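-- pv_equiv track=rewrite | github.com/Celilzngl/New-repository | metindüzenleyici.py | metin_analiz
-- ===== SOURCE A (Python) =====
-- def metin_analiz(metin):
--     harf_sayisi = 0
--     ozel_karakter = 0
--     for karakter in metin:
--         if karakter.isalpha():
--             harf_sayisi += 1
--         elif not karakter.isspace() and not karakter.isdigit():
--             ozel_karakter+= 1
--
--     kelime_sayisi = len(metin.split())
--
--     return harf_sayisi,ozel_karakter,kelime_sayisi
-- ===== SOURCE B (Python) =====
-- def metin_analiz(metin):
--     harf_sayisi = sum(1 for c in metin if c.isalpha())
--     bosluk_sayisi = sum(1 for c in metin if c.isspace())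
--     rakam_sayisi = sum(1 for c in metin if c.isdigit())
--     ozel_karakter = len(metin) - harf_sayisi - bosluk_sayisi - rakam_sayisi
--     return harf_sayisi, ozel_karakter, len(metin.split())
-- ===== Notes on version B (the rewrite author's own statement) =====
-- stated objective: idiomatic
-- what changed: Replaces A's single stateful branch-per-character loop by independent category counts (alpha/space/digit) and derives the special-character count by subtraction from the length, relying on the categories being pairwise disjoint.
import Mathlib
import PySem

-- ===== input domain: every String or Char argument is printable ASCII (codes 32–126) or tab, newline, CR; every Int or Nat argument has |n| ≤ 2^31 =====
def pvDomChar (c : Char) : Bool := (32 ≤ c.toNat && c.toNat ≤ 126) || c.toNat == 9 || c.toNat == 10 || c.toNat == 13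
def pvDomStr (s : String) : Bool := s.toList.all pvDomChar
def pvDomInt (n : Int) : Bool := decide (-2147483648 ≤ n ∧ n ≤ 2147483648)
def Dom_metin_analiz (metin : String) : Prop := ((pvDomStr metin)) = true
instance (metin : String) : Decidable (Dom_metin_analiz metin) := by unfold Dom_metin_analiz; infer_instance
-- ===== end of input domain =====

-- B counts alpha/space/digit characters independently and derives the special-character
-- count by subtraction from the length, instead of A's single stateful branching loop.

-- ===== PORT A =====
def metin_analiz (metin : String) : Int × Int × Int :=
  let p := metin.toList.foldl
    (fun (p : Int × Int) karakter =>
      if PySem.Chars.isalpha karakter then (p.1 + 1, p.2)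
      else if !PySem.Chars.isspace karakter && !PySem.Chars.isdigit karakter then (p.1, p.2 + 1)
      else p)
    ((0 : Int), (0 : Int))
  (p.1, p.2, ((PySem.Str.split₀ metin).length : Int))

-- ===== PORT B =====
def metin_analiz_alt (metin : String) : Int × Int × Int :=
  let harf_sayisi : Int := (metin.toList.countP (fun c => PySem.Chars.isalpha c) : Int)
  let bosluk_sayisi : Int := (metin.toList.countP (fun c => PySem.Chars.isspace c) : Int)
  let rakam_sayisi : Int := (metin.toList.countP (fun c => PySem.Chars.isdigit c) : Int)
  let ozel_karakter : Int := PySem.Str.len metin - harf_sayisi - bosluk_sayisi - rakam_sayisi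
  (harf_sayisi, ozel_karakter, ((PySem.Str.split₀ metin).length : Int))

-- ===== PRECONDITION & SPEC =====
def Spec_metin_analiz (metin : String) (out : Int × Int × Int) : Prop := out = metin_analiz_alt metin
instance (metin : String) (out : Int × Int × Int) : Decidable (Spec_metin_analiz metin out) := by unfold Spec_metin_analiz; infer_instance

-- ===== CLAIM (what is proved, stated in full; the proofs are below) =====
def Claim_equal_metin_analiz : Prop := ∀ (metin : String), Dom_metin_analiz metin → Spec_metin_analiz metin (metin_analiz metin)

-- ===== LEMMAS AND PROOFS =====

-- the "special character" predicate, as A's loop reaches it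
def pvSpecial (c : Char) : Bool :=
  !PySem.Chars.isalpha c && (!PySem.Chars.isspace c && !PySem.Chars.isdigit c)

lemma alpha_not_space (c : Char) (h : PySem.Chars.isalpha c = true) :
    PySem.Chars.isspace c = false := by
  revert h
  unfold PySem.Chars.isalpha PySem.Chars.isupper PySem.Chars.islower PySem.Chars.isspace
  simp only [Bool.and_eq_true, Bool.or_eq_true, decide_eq_true_eq, Bool.or_eq_false_iff,
    Bool.and_eq_false_iff, decide_eq_false_iff_not, Char.le_def, UInt32.le_iff_toNat_le,
    Char.reduceVal, UInt32.reduceToNat, Char.toNat]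
  omega

lemma alpha_not_digit (c : Char) (h : PySem.Chars.isalpha c = true) :
    PySem.Chars.isdigit c = false := by
  revert h
  unfold PySem.Chars.isalpha PySem.Chars.isupper PySem.Chars.islower PySem.Chars.isdigit
  simp only [Bool.and_eq_true, Bool.or_eq_true, decide_eq_true_eq, Bool.and_eq_false_iff,
    decide_eq_false_iff_not, Char.le_def, UInt32.le_iff_toNat_le, Char.reduceVal,
    UInt32.reduceToNat]
  omega

lemma space_not_digit (c : Char) (h : PySem.Chars.isspace c = true) :
    PySem.Chars.isdigit c = false := by
  revert h
  unfold PySem.Chars.isspace PySem.Chars.isdigit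
  simp only [Bool.and_eq_true, Bool.or_eq_true, decide_eq_true_eq, Bool.and_eq_false_iff,
    decide_eq_false_iff_not, Char.le_def, UInt32.le_iff_toNat_le, Char.reduceVal,
    UInt32.reduceToNat, Char.toNat]
  omega

-- every character is in exactly one of the four categories
lemma char_partition (c : Char) :
    (if PySem.Chars.isalpha c then 1 else 0) + (if PySem.Chars.isspace c then 1 else 0)
      + (if PySem.Chars.isdigit c then 1 else 0) + (if pvSpecial c then 1 else 0) = 1 := by
  unfold pvSpecial
  by_cases ha : PySem.Chars.isalpha c = true
  · simp [ha, alpha_not_space c ha, alpha_not_digit c ha]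
  · simp only [Bool.not_eq_true] at ha
    by_cases hs : PySem.Chars.isspace c = true
    · simp [ha, hs, space_not_digit c hs]
    · simp only [Bool.not_eq_true] at hs
      by_cases hd : PySem.Chars.isdigit c = true
      · simp [ha, hs, hd]
      · simp only [Bool.not_eq_true] at hd
        simp [ha, hs, hd]

lemma countP_partition (l : List Char) :
    l.countP (fun c => PySem.Chars.isalpha c) + l.countP (fun c => PySem.Chars.isspace c)
      + l.countP (fun c => PySem.Chars.isdigit c) + l.countP pvSpecial = l.length := by
  induction l with
  | nil => simp
  | cons c l ih =>
    simp only [List.countP_cons, List.length_cons]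
    have := char_partition c
    omega

-- characterisation of A's fold: first component counts alphas, second counts specials
lemma foldA_eq (l : List Char) (a b : Int) :
    l.foldl
      (fun (p : Int × Int) karakter =>
        if PySem.Chars.isalpha karakter then (p.1 + 1, p.2)
        else if !PySem.Chars.isspace karakter && !PySem.Chars.isdigit karakter then (p.1, p.2 + 1)
        else p)
      (a, b)
    = (a + (l.countP (fun c => PySem.Chars.isalpha c) : Int), b + (l.countP pvSpecial : Int)) := by
  induction l generalizing a b with
  | nil => simp
  | cons c l ih =>
    simp only [List.foldl_cons, List.countP_cons]
    by_cases ha : PySem.Chars.isalpha c = true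
    · have hsp : pvSpecial c = false := by simp [pvSpecial, ha]
      simp only [ha, if_true, ih]
      simp [hsp]
      push_cast
      omega
    · simp only [Bool.not_eq_true] at ha
      by_cases he : (!PySem.Chars.isspace c && !PySem.Chars.isdigit c) = true
      · have hsp : pvSpecial c = true := by simp [pvSpecial, ha, he]
        simp only [ha, Bool.false_eq_true, if_false, he, if_true, ih]
        simp [hsp]
        push_cast
        omega
      · have hsp : pvSpecial c = false := by
          simp only [pvSpecial, ha]
          simpa using he
        simp only [ha, Bool.false_eq_true, if_false, he, if_false, ih]
        simp [hsp]

-- ===== VERDICT (by name: the statement is the Claim_ definition above) =====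
theorem metin_analiz_spec : Claim_equal_metin_analiz := by
  intro metin _
  unfold Spec_metin_analiz metin_analiz metin_analiz_alt PySem.Str.len
  simp only [foldA_eq, zero_add]
  refine Prod.ext ?_ (Prod.ext ?_ rfl)
  · rfl
  · show ((metin.toList.countP pvSpecial : Int)) = _
    have := countP_partition metin.toList
    simp only []
    omega
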